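-- pv_equiv track=rewrite | github.com/patpij2/Logia-Competition-All-Solutions | logia 18/2/cukierkimojewlasne.py | ilerazy
-- ===== SOURCE A (Python) =====
-- def ilerazy(n,tab):
--     wyniki = [0]
--     aktualne = 0
--     for i in range(len(tab)):
--             for j in range(tab[i]):
--                 if i%2 == 0:
--                     aktualne +=1
--                 else:
--                     aktualne -=1
--                 wyniki.append(aktualne)
--
--     return wyniki.count(n)
-- ===== SOURCE B (Python) =====
-- def ilerazy(n, tab):
--     # per-segment interval test: each segment appends a monotone run of step 1,
--     # so it contains n at most once; O(len(tab)) instead of O(sum(tab))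
--     cnt = 1 if n == 0 else 0
--     s = 0
--     for i, t in enumerate(tab):
--         if t > 0:
--             if i % 2 == 0:
--                 if s < n <= s + t:
--                     cnt += 1
--                 s += t
--             else:
--                 if s - t <= n < s:
--                     cnt += 1
--                 s -= t
--     return cnt
-- ===== Notes on version B (the rewrite author's own statement) =====
-- stated objective: faster
-- what changed: Replaces the element-by-element simulation (appending every running value and counting n in the list) with a per-segment interval test: each segment is a monotone step-1 run, so it contains n at most once, checked in O(1).
import Mathlib
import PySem

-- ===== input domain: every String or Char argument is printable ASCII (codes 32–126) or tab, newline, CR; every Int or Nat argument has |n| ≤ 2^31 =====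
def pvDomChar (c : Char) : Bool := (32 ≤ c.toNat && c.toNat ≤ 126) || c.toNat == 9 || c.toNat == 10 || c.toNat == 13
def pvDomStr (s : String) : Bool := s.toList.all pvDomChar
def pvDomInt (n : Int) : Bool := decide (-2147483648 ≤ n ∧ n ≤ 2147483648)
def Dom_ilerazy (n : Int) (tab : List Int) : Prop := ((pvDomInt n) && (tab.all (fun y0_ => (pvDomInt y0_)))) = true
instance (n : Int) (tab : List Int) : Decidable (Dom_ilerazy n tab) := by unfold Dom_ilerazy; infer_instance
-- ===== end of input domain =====

-- B replaces A's element-by-element simulation (append every running prefix value, then count n)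
-- with a constant-time interval test per segment; objective: faster (O(len tab) vs O(sum tab)).

-- ===== PORT A =====
-- inner 'for j in range(tab[i])' loop of A, as a helper (literal body of A's inner loop)
def innerA (i t : Int) (st : List Int × Int) : List Int × Int :=
  (PySem.List.pyRange 0 t 1).foldl
    (fun (st : List Int × Int) _j =>
      let a := if PySem.Int.mod i 2 == 0 then st.2 + 1 else st.2 - 1
      (st.1 ++ [a], a)) st

def ilerazy (n : Int) (tab : List Int) : Int :=
  let res := (PySem.List.pyRange 0 (tab.length : Int) 1).foldl
    (fun (st : List Int × Int) i => innerA i (PySem.List.pyGetD tab i 0) st)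
    ([0], 0)
  ((PySem.List.count res.1 n : Nat) : Int)

-- ===== PORT B =====
-- body of B's 'for i, t in enumerate(tab)' loop
def stepB (n : Int) (st : Int × Int) (p : Int × Int) : Int × Int :=
  if p.2 > 0 then
    if PySem.Int.mod p.1 2 == 0 then
      ((if st.2 < n ∧ n ≤ st.2 + p.2 then st.1 + 1 else st.1), st.2 + p.2)
    else
      ((if st.2 - p.2 ≤ n ∧ n < st.2 then st.1 + 1 else st.1), st.2 - p.2)
  else st

def ilerazy_alt (n : Int) (tab : List Int) : Int :=
  ((PySem.List.enumerate tab).foldl (stepB n) ((if n == 0 then 1 else 0), 0)).1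

-- ===== PRECONDITION & SPEC =====
def Spec_ilerazy (n : Int) (tab : List Int) (out : Int) : Prop := out = ilerazy_alt n tab
instance (n : Int) (tab : List Int) (out : Int) : Decidable (Spec_ilerazy n tab out) := by unfold Spec_ilerazy; infer_instance

-- ===== CLAIM (what is proved, stated in full; the proofs are below) =====
def Claim_equal_ilerazy : Prop := ∀ (n : Int) (tab : List Int), Dom_ilerazy n tab → Spec_ilerazy n tab (ilerazy n tab)

-- ===== LEMMAS AND PROOFS =====

-- the increasing inner loop, over any list it ignores
lemma run_up (l : List Int) : ∀ (w : List Int) (s : Int),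
    l.foldl (fun (st : List Int × Int) _ => (st.1 ++ [st.2 + 1], st.2 + 1)) (w, s)
      = (w ++ (List.range l.length).map (fun (j : Nat) => s + 1 + (j : Int)), s + (l.length : Int)) := by
  induction l with
  | nil => intro w s; simp
  | cons x xs ih =>
      intro w s
      simp only [List.foldl_cons, ih, List.length_cons]
      rw [Prod.mk.injEq]
      refine ⟨?_, by push_cast; ring⟩

      rw [List.append_assoc]
      congr 1
      apply List.ext_getElem
      · simp
      · intro i h1 h2
        cases i with
        | zero => simp
        | succ i => simp; ring

lemma run_down (l : List Int) : ∀ (w : List Int) (s : Int),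
    l.foldl (fun (st : List Int × Int) _ => (st.1 ++ [st.2 - 1], st.2 - 1)) (w, s)
      = (w ++ (List.range l.length).map (fun (j : Nat) => s - 1 - (j : Int)), s - (l.length : Int)) := by
  induction l with
  | nil => intro w s; simp
  | cons x xs ih =>
      intro w s
      simp only [List.foldl_cons, ih, List.length_cons]
      rw [Prod.mk.injEq]
      refine ⟨?_, by push_cast; ring⟩

      rw [List.append_assoc]
      congr 1
      apply List.ext_getElem
      · simp
      · intro i h1 h2
        cases i with
        | zero => simp
        | succ i => simp; ring

lemma innerA_spec (i t : Int) (w : List Int) (s : Int) :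
    innerA i t (w, s) =
      if PySem.Int.mod i 2 == 0 then
        (w ++ (List.range t.toNat).map (fun (j : Nat) => s + 1 + (j : Int)), s + (t.toNat : Int))
      else
        (w ++ (List.range t.toNat).map (fun (j : Nat) => s - 1 - (j : Int)), s - (t.toNat : Int)) := by
  unfold innerA
  by_cases h : PySem.Int.mod i 2 = 0
  · have he : i % 2 = 0 := by
      rw [← PySem.Int.mod_eq_emod_of_pos (by norm_num : (0:Int) < 2)]; exact h
    simp only [h, beq_self_eq_true, if_true]
    have := run_up (PySem.List.pyRange 0 t 1) w s
    simpa [PySem.List.length_pyRange_one, he] using this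
  · have h1 : PySem.Int.mod i 2 = 1 := by
      rcases PySem.Int.mod_two_eq i with h' | h'
      · exact absurd h' h
      · exact h'
    have he : i % 2 = 1 := by
      rw [← PySem.Int.mod_eq_emod_of_pos (by norm_num : (0:Int) < 2)]; exact h1
    have hb : (PySem.Int.mod i 2 == 0) = false := by simp [he]
    simp only [hb, Bool.false_eq_true, if_false]
    have := run_down (PySem.List.pyRange 0 t 1) w s
    simpa [PySem.List.length_pyRange_one, he] using this

lemma count_up_seg (k : Nat) (s n : Int) :
    (((List.range k).map (fun (j : Nat) => s + 1 + (j : Int))).count n : Int)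
      = if s < n ∧ n ≤ s + (k : Int) then 1 else 0 := by
  have hnd : ((List.range k).map (fun (j : Nat) => s + 1 + (j : Int))).Nodup :=
    (List.nodup_range).map (by
      intro a b h
      have h' : s + 1 + (a : Int) = s + 1 + (b : Int) := h
      omega)
  have hmem : n ∈ (List.range k).map (fun (j : Nat) => s + 1 + (j : Int)) ↔ s < n ∧ n ≤ s + (k : Int) := by
    simp only [List.mem_map, List.mem_range]
    constructor
    · rintro ⟨j, hj, rfl⟩; omega
    · rintro ⟨h1, h2⟩; exact ⟨(n - s - 1).toNat, by omega, by omega⟩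
  split_ifs with hc
  · rw [List.count_eq_one_of_mem hnd (hmem.mpr hc)]; rfl
  · rw [List.count_eq_zero.mpr (fun hm => hc (hmem.mp hm))]; rfl

lemma count_down_seg (k : Nat) (s n : Int) :
    (((List.range k).map (fun (j : Nat) => s - 1 - (j : Int))).count n : Int)
      = if s - (k : Int) ≤ n ∧ n < s then 1 else 0 := by
  have hnd : ((List.range k).map (fun (j : Nat) => s - 1 - (j : Int))).Nodup :=
    (List.nodup_range).map (by
      intro a b h
      have h' : s - 1 - (a : Int) = s - 1 - (b : Int) := h
      omega)
  have hmem : n ∈ (List.range k).map (fun (j : Nat) => s - 1 - (j : Int)) ↔ s - (k : Int) ≤ n ∧ n < s := by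
    simp only [List.mem_map, List.mem_range]
    constructor
    · rintro ⟨j, hj, rfl⟩; omega
    · rintro ⟨h1, h2⟩; exact ⟨(s - 1 - n).toNat, by omega, by omega⟩
  split_ifs with hc
  · rw [List.count_eq_one_of_mem hnd (hmem.mpr hc)]; rfl
  · rw [List.count_eq_zero.mpr (fun hm => hc (hmem.mp hm))]; rfl

-- main loop invariant: A's fold over (index, value) pairs vs B's fold
lemma main_inv (n : Int) (tab : List Int) : ∀ (s0 : Int) (w : List Int) (s c : Int),
    ((PySem.List.count ((PySem.List.enumerate tab s0).foldl
        (fun (st : List Int × Int) p => innerA p.1 p.2 st) (w, s)).1 n : Nat) : Int) + c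
      = ((PySem.List.count w n : Nat) : Int)
          + ((PySem.List.enumerate tab s0).foldl (stepB n) (c, s)).1
    ∧ ((PySem.List.enumerate tab s0).foldl
        (fun (st : List Int × Int) p => innerA p.1 p.2 st) (w, s)).2
      = ((PySem.List.enumerate tab s0).foldl (stepB n) (c, s)).2 := by
  induction tab with
  | nil => intro s0 w s c; simp [PySem.List.enumerate_nil]
  | cons x xs ih =>
      intro s0 w s c
      rw [PySem.List.enumerate_cons]
      simp only [List.foldl_cons]
      rw [innerA_spec]
      by_cases hpar : PySem.Int.mod s0 2 = 0
      · have hpe : s0 % 2 = 0 := by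
          rw [← PySem.Int.mod_eq_emod_of_pos (by norm_num : (0:Int) < 2)]; exact hpar
        simp only [hpar, beq_self_eq_true, if_true]
        have hstep : stepB n (c, s) (s0, x)
            = ((if x > 0 ∧ s < n ∧ n ≤ s + x then c + 1 else c), s + x.toNat) := by
          by_cases hx0 : x > 0
          · have h2 : (x.toNat : Int) = x := by omega
            simp [stepB, hpe, hx0, h2]
          · have h2 : (x.toNat : Int) = 0 := by omega
            simp [stepB, hx0, h2]
        rw [hstep]
        obtain ⟨ih1, ih2⟩ := ih (s0 + 1) (w ++ (List.range x.toNat).map (fun (j : Nat) => s + 1 + (j : Int)))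
          (s + (x.toNat : Int)) (if x > 0 ∧ s < n ∧ n ≤ s + x then c + 1 else c)
        refine ⟨?_, ih2⟩
        have hsplit : (PySem.List.count (w ++ (List.range x.toNat).map (fun (j : Nat) => s + 1 + (j : Int))) n : Int)
            = (PySem.List.count w n : Int)
              + (((List.range x.toNat).map (fun (j : Nat) => s + 1 + (j : Int))).count n : Int) := by
          simp [PySem.List.count_eq, List.count_append]
        have hseg := count_up_seg x.toNat s n
        have hcond : (s < n ∧ n ≤ s + (x.toNat : Int)) ↔ (x > 0 ∧ s < n ∧ n ≤ s + x) := by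
          constructor
          · rintro ⟨h1, h2⟩; refine ⟨by omega, h1, by omega⟩
          · rintro ⟨h1, h2, h3⟩; exact ⟨h2, by omega⟩
        simp only [hcond] at hseg
        by_cases hC : x > 0 ∧ s < n ∧ n ≤ s + x
        · rw [if_pos hC] at ih1 hseg ⊢; omega
        · rw [if_neg hC] at ih1 hseg ⊢; omega
      · have h1 : PySem.Int.mod s0 2 = 1 := by
          rcases PySem.Int.mod_two_eq s0 with h' | h'
          · exact absurd h' hpar
          · exact h'
        have hpo : s0 % 2 = 1 := by
          rw [← PySem.Int.mod_eq_emod_of_pos (by norm_num : (0:Int) < 2)]; exact h1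
        have hb : (PySem.Int.mod s0 2 == 0) = false := by simp [hpo]
        simp only [hb, Bool.false_eq_true, if_false]
        have hstep : stepB n (c, s) (s0, x)
            = ((if x > 0 ∧ s - x ≤ n ∧ n < s then c + 1 else c), s - x.toNat) := by
          by_cases hx0 : x > 0
          · have h2 : (x.toNat : Int) = x := by omega
            simp [stepB, hpo, hx0, h2]
          · have h2 : (x.toNat : Int) = 0 := by omega
            simp [stepB, hx0, h2]
        rw [hstep]
        obtain ⟨ih1, ih2⟩ := ih (s0 + 1) (w ++ (List.range x.toNat).map (fun (j : Nat) => s - 1 - (j : Int)))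
          (s - (x.toNat : Int)) (if x > 0 ∧ s - x ≤ n ∧ n < s then c + 1 else c)
        refine ⟨?_, ih2⟩
        have hsplit : (PySem.List.count (w ++ (List.range x.toNat).map (fun (j : Nat) => s - 1 - (j : Int))) n : Int)
            = (PySem.List.count w n : Int)
              + (((List.range x.toNat).map (fun (j : Nat) => s - 1 - (j : Int))).count n : Int) := by
          simp [PySem.List.count_eq, List.count_append]
        have hseg := count_down_seg x.toNat s n
        have hcond : (s - (x.toNat : Int) ≤ n ∧ n < s) ↔ (x > 0 ∧ s - x ≤ n ∧ n < s) := by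
          constructor
          · rintro ⟨h1, h2⟩; refine ⟨by omega, by omega, h2⟩
          · rintro ⟨h1, h2, h3⟩; exact ⟨by omega, h3⟩
        simp only [hcond] at hseg
        by_cases hC : x > 0 ∧ s - x ≤ n ∧ n < s
        · rw [if_pos hC] at ih1 hseg ⊢; omega
        · rw [if_neg hC] at ih1 hseg ⊢; omega

-- ===== VERDICT (by name: the statement is the Claim_ definition above) =====
theorem ilerazy_spec : Claim_equal_ilerazy := by
  intro n tab _
  unfold Spec_ilerazy ilerazy ilerazy_alt
  have henum := PySem.List.enumerate_eq_map_pyRange (xs := tab) (d := 0)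
  have hfold : (PySem.List.pyRange 0 (tab.length : Int) 1).foldl
      (fun (st : List Int × Int) i => innerA i (PySem.List.pyGetD tab i 0) st) ([0], 0)
      = (PySem.List.enumerate tab).foldl
        (fun (st : List Int × Int) p => innerA p.1 p.2 st) ([0], 0) := by
    rw [henum, List.foldl_map]
    simp [PySem.List.len_eq]
  simp only [hfold]
  have h := (main_inv n tab 0 [0] 0 (if n == 0 then 1 else 0)).1
  have hc : ((PySem.List.count [0] n : Nat) : Int) = (if n == 0 then 1 else 0) := by
    by_cases hn : n = 0
    · simp [PySem.List.count_eq, hn]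
    · simp [PySem.List.count_eq, List.count_singleton, hn]
      omega
  rw [hc] at h
  omega
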